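-- pv_equiv track=rewrite | github.com/Imwisagist/Leetcode_algorithm_tasks | easy/2511.Maximum Enemy Forts That Can Be Captured.py | captureForts
-- ===== SOURCE A (Python) =====
-- from typing import List
--
-- def captureForts(forts: List[int]) -> int:
--     r = len(forts) - 1; l = res = 0; cur_l = cur_r = -1
--
--     while l <= r or r >= 0:
--         left_fort, right_fort = forts[l], forts[r]
--
--         if left_fort == 1: cur_l = 0
--         elif left_fort == 0:
--             if cur_l >= 0: cur_l += 1
--         else: res = max(res, cur_l); cur_l = -1
--
--         if right_fort == 1: cur_r = 0
--         elif right_fort == 0: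
--             if cur_r >= 0: cur_r += 1
--         else: res = max(res, cur_r); cur_r = -1
--
--         l += 1; r -= 1
--
--     return res
-- ===== SOURCE B (Python) =====
-- def captureForts(forts):
--     # Collect the positions and kinds of all non-zero forts, then take the
--     # maximum gap between adjacent forts of opposite kind (own fort == 1,
--     # enemy fort == anything else non-zero).
--     posts = [(i, x == 1) for i, x in enumerate(forts) if x != 0]
--     res = 0
--     for (i, a), (j, b) in zip(posts, posts[1:]):
--         if a != b:
--             res = max(res, j - i - 1)
--     return res
-- ===== Notes on version B (the rewrite author's own statement) =====
-- stated objective: simpler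
-- what changed: A's fused bidirectional two-counter scan (left and right cursors with running zero-counters) is replaced by collecting the positions of all non-zero forts once and taking the maximum index gap between adjacent forts of opposite kind.
import Mathlib
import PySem

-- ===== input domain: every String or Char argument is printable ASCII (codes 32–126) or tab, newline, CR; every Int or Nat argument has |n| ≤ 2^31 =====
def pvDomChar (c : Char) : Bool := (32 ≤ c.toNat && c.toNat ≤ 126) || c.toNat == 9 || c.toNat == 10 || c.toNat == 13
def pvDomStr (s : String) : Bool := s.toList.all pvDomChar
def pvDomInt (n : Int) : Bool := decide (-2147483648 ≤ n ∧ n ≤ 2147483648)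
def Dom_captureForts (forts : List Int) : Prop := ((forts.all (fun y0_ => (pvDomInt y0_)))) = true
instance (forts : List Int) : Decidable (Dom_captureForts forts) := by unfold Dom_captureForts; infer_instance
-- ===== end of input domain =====

-- B replaces A's fused bidirectional two-counter scan by collecting the non-zero fort
-- positions once and maximizing the gap between adjacent opposite-kind forts (same cost; simpler).


-- ===== PORT A =====
-- one side of the loop body: the (res, cur) update for one fort value
def stepA (s : Int × Int) (x : Int) : Int × Int :=
  if x = 1 then (s.1, 0)
  else if x = 0 then (s.1, if 0 ≤ s.2 then s.2 + 1 else s.2)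
  else (max s.1 s.2, -1)

-- the whole loop body: left update with forts[l], then right update with forts[r],
-- res threaded through; state is (res, cur_l, cur_r)
def fstepA (s : Int × Int × Int) (p : Int × Int) : Int × Int × Int :=
  let t := stepA (s.1, s.2.1) p.1
  let u := stepA (t.1, s.2.2) p.2
  (u.1, t.2, u.2)

-- The loop condition `l <= r or r >= 0` (with l ≥ 0, l+r = len-1 invariant) holds exactly
-- for the first len(forts) iterations, during which (forts[l], forts[r]) enumerates
-- zip(forts, reversed(forts)); all indexing is in range, so A is total.
def captureForts (forts : List Int) : Int :=
  ((forts.zip forts.reverse).foldl fstepA (0, -1, -1)).1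

-- ===== PORT B =====
-- posts = [(i, x == 1) for i, x in enumerate(forts) if x != 0]
def postsB (forts : List Int) : List (Int × Bool) :=
  ((PySem.List.enumerate forts).filter (fun p => p.2 ≠ 0)).map (fun p => (p.1, p.2 == 1))

-- for (i,a),(j,b) in zip(posts, posts[1:]): if a != b: res = max(res, j - i - 1)
def captureForts_alt (forts : List Int) : Int :=
  let posts := postsB forts
  (posts.zip posts.tail).foldl
    (fun res q => if q.1.2 ≠ q.2.2 then max res (q.2.1 - q.1.1 - 1) else res) 0

-- ===== PRECONDITION & SPEC =====
def Spec_captureForts (forts : List Int) (out : Int) : Prop := out = captureForts_alt forts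
instance (forts : List Int) (out : Int) : Decidable (Spec_captureForts forts out) := by unfold Spec_captureForts; infer_instance

-- ===== CLAIM (what is proved, stated in full; the proofs are below) =====
def Claim_equal_captureForts : Prop := ∀ (forts : List Int), Dom_captureForts forts → Spec_captureForts forts (captureForts forts)

-- ===== LEMMAS AND PROOFS =====

-- positions (from index i) and kinds of the non-zero forts
def nzFrom (i : Int) : List Int → List (Int × Bool)
  | [] => []
  | x :: t => if x = 0 then nzFrom (i + 1) t else (i, x == 1) :: nzFrom (i + 1) t

-- max gap over adjacent (own=1, enemy) pairs, left kind 1 first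
def maxTF : List (Int × Bool) → Int
  | [] => 0
  | [_] => 0
  | (i, a) :: (j, b) :: t =>
    if a = true ∧ b = false then max (j - i - 1) (maxTF ((j, b) :: t)) else maxTF ((j, b) :: t)

-- max gap over adjacent (enemy, own=1) pairs
def maxFT : List (Int × Bool) → Int
  | [] => 0
  | [_] => 0
  | (i, a) :: (j, b) :: t =>
    if a = false ∧ b = true then max (j - i - 1) (maxFT ((j, b) :: t)) else maxFT ((j, b) :: t)

lemma maxTF_nonneg (ps : List (Int × Bool)) : 0 ≤ maxTF ps := by
  induction ps using maxTF.induct with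
  | case1 => simp [maxTF]
  | case2 p => simp [maxTF]
  | case3 i a j b t h ih => simp only [maxTF, if_pos h]; exact le_max_of_le_right ih
  | case4 i a j b t h ih => simp only [maxTF, if_neg h]; exact ih

lemma maxFT_nonneg (ps : List (Int × Bool)) : 0 ≤ maxFT ps := by
  induction ps using maxFT.induct with
  | case1 => simp [maxFT]
  | case2 p => simp [maxFT]
  | case3 i a j b t h ih => simp only [maxFT, if_pos h]; exact le_max_of_le_right ih
  | case4 i a j b t h ih => simp only [maxFT, if_neg h]; exact ih

lemma stepA_snd (r r' c x : Int) : (stepA (r, c) x).2 = (stepA (r', c) x).2 := by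
  simp only [stepA]; split_ifs <;> rfl

lemma stepA_fst_max (a b c x : Int) :
    (stepA (max a b, c) x).1 = max ((stepA (a, c) x).1) b := by
  simp [stepA]; split_ifs <;> first | (simp; omega) | simp | omega

-- the fused fold over zip splits into two independent one-direction scans
lemma fused_split (ps : List (Int × Int)) :
    ∀ (resL resR cl cr : Int),
      ((ps.foldl fstepA (max resL resR, cl, cr))).1 =
        max ((ps.map Prod.fst).foldl stepA (resL, cl)).1
            ((ps.map Prod.snd).foldl stepA (resR, cr)).1 := by
  induction ps with
  | nil => intro resL resR cl cr; simp
  | cons p t ih =>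
    intro resL resR cl cr
    simp only [List.foldl_cons, List.map_cons]
    have h1 : fstepA (max resL resR, cl, cr) p =
        (max ((stepA (resL, cl) p.1).1) ((stepA (resR, cr) p.2).1),
         (stepA (resL, cl) p.1).2, (stepA (resR, cr) p.2).2) := by
      simp only [fstepA]
      refine Prod.ext ?_ (Prod.ext ?_ ?_)
      · show (stepA ((stepA (max resL resR, cl) p.1).1, cr) p.2).1 = _
        rw [stepA_fst_max, max_comm ((stepA (resL, cl) p.1).1) resR, stepA_fst_max,
          max_comm ((stepA (resR, cr) p.2).1)]
      · exact stepA_snd _ _ _ _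
      · show (stepA ((stepA (max resL resR, cl) p.1).1, cr) p.2).2 = _
        exact stepA_snd _ _ _ _
    rw [h1, ih]

-- one-direction scan = max over (1, enemy) adjacent gaps in the non-zero list;
-- when 0 ≤ cur there is a pending own fort at index i - cur - 1
lemma maxTF_cons_false (i : Int) (ps : List (Int × Bool)) :
    maxTF ((i, false) :: ps) = maxTF ps := by
  cases ps with
  | nil => simp [maxTF]
  | cons q t => cases q; simp [maxTF]

lemma maxTF_cons_true_true (i j : Int) (t : List (Int × Bool)) :
    maxTF ((i, true) :: (j, true) :: t) = maxTF ((j, true) :: t) := by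
  simp [maxTF]

lemma maxTF_cons_true_false (i j : Int) (t : List (Int × Bool)) :
    maxTF ((i, true) :: (j, false) :: t) = max (j - i - 1) (maxTF ((j, false) :: t)) := by
  simp [maxTF]

lemma maxTF_cons_cons_neg (i j : Int) (a b : Bool) (t : List (Int × Bool))
    (h : ¬(a = true ∧ b = false)) :
    maxTF ((i, a) :: (j, b) :: t) = maxTF ((j, b) :: t) := by
  simp only [maxTF, if_neg h]

lemma maxFT_cons_cons_pos (i j : Int) (t : List (Int × Bool)) :
    maxFT ((i, false) :: (j, true) :: t) = max (j - i - 1) (maxFT ((j, true) :: t)) := by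
  simp [maxFT]

lemma maxFT_cons_cons_neg (i j : Int) (a b : Bool) (t : List (Int × Bool))
    (h : ¬(a = false ∧ b = true)) :
    maxFT ((i, a) :: (j, b) :: t) = maxFT ((j, b) :: t) := by
  simp only [maxFT, if_neg h]

lemma scan_eq (xs : List Int) :
    ∀ (i res cur : Int), 0 ≤ res → -1 ≤ cur →
      (xs.foldl stepA (res, cur)).1 =
        max res (maxTF ((if 0 ≤ cur then [(i - cur - 1, true)] else []) ++ nzFrom i xs)) := by
  induction xs with
  | nil =>
    intro i res cur hres hcur
    simp only [List.foldl_nil, nzFrom, List.append_nil]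
    split_ifs with h
    · simp [maxTF]; omega
    · simp [maxTF]; omega
  | cons x t ih =>
    intro i res cur hres hcur
    simp only [List.foldl_cons]
    by_cases h1 : x = 1
    · subst h1
      have hs : stepA (res, cur) 1 = (res, 0) := by simp [stepA]
      rw [hs, ih (i + 1) res 0 hres (by omega)]
      have hnz : nzFrom i (1 :: t) = (i, true) :: nzFrom (i + 1) t := by
        simp [nzFrom]
      rw [hnz]
      have harg : i + 1 - 0 - 1 = i := by ring
      rw [if_pos (le_refl (0 : Int)), harg]
      split_ifs with h
      · -- pending own fort followed by another own fort: first pair never counts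
        cases hrest : nzFrom (i + 1) t with
        | nil => simp [maxTF]
        | cons q r => simp only [List.cons_append, List.nil_append, maxTF_cons_true_true]
      · simp
    · by_cases h0 : x = 0
      · subst h0
        have hnz : nzFrom i (0 :: t) = nzFrom (i + 1) t := by simp [nzFrom]
        by_cases hc : 0 ≤ cur
        · have hs : stepA (res, cur) 0 = (res, cur + 1) := by simp [stepA, hc]
          rw [hs, ih (i + 1) res (cur + 1) hres (by omega), hnz]
          have harg : i + 1 - (cur + 1) - 1 = i - cur - 1 := by ring
          rw [if_pos (by omega : (0:Int) ≤ cur + 1), harg, if_pos hc]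
        · have hs : stepA (res, cur) 0 = (res, cur) := by simp [stepA, hc]
          rw [hs, ih (i + 1) res cur hres hcur, hnz, if_neg hc, if_neg hc]
      · -- enemy fort
        have hs : stepA (res, cur) x = (max res cur, -1) := by simp [stepA, h0, h1]
        rw [hs, ih (i + 1) (max res cur) (-1) (by omega) (by omega)]
        have hb : (x == 1) = false := by simp [h1]
        have hnz : nzFrom i (x :: t) = (i, false) :: nzFrom (i + 1) t := by
          simp [nzFrom, h0, hb]
        rw [hnz, if_neg (by omega : ¬ (0:Int) ≤ -1)]
        simp only [List.nil_append]
        split_ifs with hc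
        · rw [List.singleton_append, maxTF_cons_true_false, maxTF_cons_false]
          have : i - (i - cur - 1) - 1 = cur := by ring
          rw [this]
          omega
        · simp only [List.nil_append]
          rw [maxTF_cons_false]
          omega

-- nzFrom distributes over append
lemma nzFrom_append (ys zs : List Int) : ∀ i : Int,
    nzFrom i (ys ++ zs) = nzFrom i ys ++ nzFrom (i + ys.length) zs := by
  induction ys with
  | nil => intro i; simp [nzFrom]
  | cons y t ih =>
    intro i
    simp only [List.cons_append, nzFrom, ih (i + 1), List.length_cons]
    split_ifs <;> simp <;> ring_nf

-- shifting the start index shifts all recorded positions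
lemma nzFrom_shift (xs : List Int) : ∀ i j : Int,
    nzFrom (i + j) xs = (nzFrom j xs).map (fun p => (i + p.1, p.2)) := by
  induction xs with
  | nil => intro i j; simp [nzFrom]
  | cons x t ih =>
    intro i j
    simp only [nzFrom]
    split_ifs with h
    · rw [show i + j + 1 = i + (j + 1) from by ring, ih]
    · simp only [List.map_cons]
      rw [show i + j + 1 = i + (j + 1) from by ring, ih]

-- reversing the list reverses the non-zero list and flips indices i ↦ n-1-i
lemma nzFrom_reverse (xs : List Int) :
    nzFrom 0 xs.reverse =
      ((nzFrom 0 xs).map (fun p => ((xs.length : Int) - 1 - p.1, p.2))).reverse := by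
  induction xs with
  | nil => simp [nzFrom]
  | cons x t ih =>
    rw [show (x :: t).reverse = t.reverse ++ [x] from by simp, nzFrom_append, ih]
    simp only [nzFrom, List.length_reverse, List.length_cons]
    split_ifs with h0
    · rw [show (0 : Int) + 1 = 1 + 0 from by ring, nzFrom_shift t 1 0]
      simp only [List.append_nil, List.map_map]
      congr 1
      apply List.map_congr_left
      intro p _
      simp only [Function.comp_apply]
      refine Prod.ext ?_ rfl
      push_cast
      ring
    · simp only [List.map_cons, List.reverse_cons]
      rw [show (0 : Int) + 1 = 1 + 0 from by ring, nzFrom_shift t 1 0]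
      simp only [List.map_map]
      congr 1
      · congr 1
        apply List.map_congr_left
        intro p _
        simp only [Function.comp_apply]
        refine Prod.ext ?_ rfl
        push_cast
        ring
      · refine congrArg (fun z => [z]) (Prod.ext ?_ rfl)
        push_cast
        ring

-- contribution of appending q after a list ending in o
def tfgap (o : Option (Int × Bool)) (q : Int × Bool) : Int :=
  match o, q with
  | some (_, false), _ => 0
  | some (i, true), (j, b) => if b = false then max 0 (j - i - 1) else 0
  | none, _ => 0

-- snoc characterization of maxTF
lemma maxTF_snoc (ps : List (Int × Bool)) (q : Int × Bool) :
    maxTF (ps ++ [q]) = max (maxTF ps) (tfgap ps.getLast? q) := by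
  induction ps using maxTF.induct with
  | case1 => simp [maxTF, tfgap]
  | case2 p =>
    obtain ⟨i, a⟩ := p
    obtain ⟨j, b⟩ := q
    cases a <;> cases b <;> first | (simp [maxTF, tfgap]; omega) | simp [maxTF, tfgap]
  | case3 i a j b t h ih =>
    obtain ⟨ha, hb⟩ := h
    subst ha; subst hb
    simp only [List.cons_append] at ih ⊢
    rw [maxTF_cons_true_false, maxTF_cons_true_false, ih, List.getLast?_cons_cons]
    omega
  | case4 i a j b t h ih =>
    simp only [List.cons_append] at ih ⊢
    rw [maxTF_cons_cons_neg _ _ _ _ _ h, maxTF_cons_cons_neg _ _ _ _ _ h, ih,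
      List.getLast?_cons_cons]

-- index-flip + reverse turns (enemy,1) patterns into (1,enemy) patterns, gaps preserved
lemma maxTF_revflip (ps : List (Int × Bool)) (c : Int) :
    maxTF ((ps.map (fun p => (c - p.1, p.2))).reverse) = maxFT ps := by
  induction ps using maxFT.induct with
  | case1 => simp [maxTF, maxFT]
  | case2 p => simp [maxTF, maxFT]
  | case3 i a j b t h ih =>
    obtain ⟨ha, hb⟩ := h
    subst ha; subst hb
    rw [show (((i, false) :: (j, true) :: t).map (fun p => (c - p.1, p.2))).reverse
        = ((((j, true) :: t).map (fun p => (c - p.1, p.2))).reverse) ++ [(c - i, false)] from by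
          simp, maxTF_snoc, ih, List.getLast?_reverse]
    rw [show (((j, true) :: t).map (fun p => (c - p.1, p.2))).head? = some (c - j, true) from by
          simp]
    rw [maxFT_cons_cons_pos]
    simp only [tfgap, if_pos trivial]
    have := maxFT_nonneg ((j, true) :: t)
    omega
  | case4 i a j b t h ih =>
    rw [show (((i, a) :: (j, b) :: t).map (fun p => (c - p.1, p.2))).reverse
        = ((((j, b) :: t).map (fun p => (c - p.1, p.2))).reverse) ++ [(c - i, a)] from by
          simp, maxTF_snoc, ih, List.getLast?_reverse]
    rw [show (((j, b) :: t).map (fun p => (c - p.1, p.2))).head? = some (c - j, b) from by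
          simp]
    rw [maxFT_cons_cons_neg _ _ _ _ _ h]
    have hgap : tfgap (some (c - j, b)) (c - i, a) = 0 := by
      cases b
      · rfl
      · cases a
        · exact absurd ⟨rfl, rfl⟩ h
        · simp [tfgap]
    rw [hgap]
    have := maxFT_nonneg ((j, b) :: t)
    omega

-- B's fold over adjacent pairs = max of the two pattern maxima
lemma foldB_eq (ps : List (Int × Bool)) :
    ∀ res : Int, 0 ≤ res →
      ((ps.zip ps.tail).foldl
        (fun res q => if q.1.2 ≠ q.2.2 then max res (q.2.1 - q.1.1 - 1) else res) res) =
      max res (max (maxTF ps) (maxFT ps)) := by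
  induction ps using maxTF.induct with
  | case1 => intro res hres; simp [maxTF, maxFT]; omega
  | case2 p => intro res hres; simp [maxTF, maxFT]; omega
  | case3 i a j b t h ih =>
    intro res hres
    obtain ⟨ha, hb⟩ := h
    subst ha; subst hb
    have hz : (((i, true) :: (j, false) :: t).zip ((i, true) :: (j, false) :: t).tail) =
        ((i, true), (j, false)) :: (((j, false) :: t).zip ((j, false) :: t).tail) := rfl
    rw [hz]
    simp only [List.foldl_cons]
    rw [if_pos (by simp), ih (max res (j - i - 1)) (by omega)]
    rw [maxTF_cons_true_false, maxFT_cons_cons_neg _ _ _ _ _ (by simp)]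
    omega
  | case4 i a j b t h ih =>
    intro res hres
    have hz : (((i, a) :: (j, b) :: t).zip ((i, a) :: (j, b) :: t).tail) =
        ((i, a), (j, b)) :: (((j, b) :: t).zip ((j, b) :: t).tail) := rfl
    rw [hz]
    simp only [List.foldl_cons]
    rw [maxTF_cons_cons_neg _ _ _ _ _ h]
    cases a
    · cases b
      · rw [if_neg (by simp), ih res hres, maxFT_cons_cons_neg _ _ _ _ _ (by simp)]
      · rw [if_pos (by simp), ih (max res (j - i - 1)) (by omega), maxFT_cons_cons_pos]
        omega
    · cases b
      · exact absurd ⟨rfl, rfl⟩ h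
      · rw [if_neg (by simp), ih res hres, maxFT_cons_cons_neg _ _ _ _ _ (by simp)]

-- posts from Source B equals nzFrom 0
lemma postsB_gen (xs : List Int) : ∀ s : Int,
    ((PySem.List.enumerate xs s).filter (fun p => p.2 ≠ 0)).map (fun p => (p.1, p.2 == 1)) =
      nzFrom s xs := by
  induction xs with
  | nil => intro s; simp [PySem.List.enumerate_nil, nzFrom]
  | cons x t ih =>
    intro s
    rw [PySem.List.enumerate_cons, nzFrom]
    split_ifs with h
    · rw [List.filter_cons_of_neg (by simp [h]), ih]
    · rw [List.filter_cons_of_pos (by simp [h]), List.map_cons, ih]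

lemma postsB_eq (forts : List Int) : postsB forts = nzFrom 0 forts := by
  unfold postsB
  exact postsB_gen forts 0

-- A's fused scan splits into the two one-direction scans
lemma captureForts_eq_max (forts : List Int) :
    captureForts forts =
      max ((forts.foldl stepA (0, -1)).1) ((forts.reverse.foldl stepA (0, -1)).1) := by
  unfold captureForts
  have h := fused_split (forts.zip forts.reverse) 0 0 (-1) (-1)
  rw [List.map_fst_zip (by simp), List.map_snd_zip (by simp)] at h
  simpa using h

lemma scan_closed (xs : List Int) :
    (xs.foldl stepA (0, -1)).1 = maxTF (nzFrom 0 xs) := by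
  rw [scan_eq xs 0 0 (-1) le_rfl le_rfl, if_neg (by omega)]
  simp only [List.nil_append]
  exact max_eq_right (maxTF_nonneg _)

-- ===== VERDICT (by name: the statement is the Claim_ definition above) =====
theorem captureForts_spec : Claim_equal_captureForts := by
  intro forts _
  show captureForts forts = captureForts_alt forts
  have hR : (forts.reverse.foldl stepA (0, -1)).1 = maxFT (nzFrom 0 forts) := by
    rw [scan_closed, nzFrom_reverse, maxTF_revflip]
  have hB : captureForts_alt forts =
      max (maxTF (nzFrom 0 forts)) (maxFT (nzFrom 0 forts)) := by
    simp only [captureForts_alt]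
    rw [postsB_eq, foldB_eq _ 0 le_rfl]
    exact max_eq_right (le_max_of_le_left (maxTF_nonneg _))
  rw [captureForts_eq_max, scan_closed, hR, hB]
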